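-- pv_equiv track=rewrite | github.com/JoseCerezo90/TFM-Construccion-evolutiva-de-redes-de-neuronas-con-entrenamiento-parcial | Scripts auxiliares/crear_csv.py | get_comas
-- ===== SOURCE A (Python) =====
-- def get_comas(cadena):
--     sp = ''
--     sw = ''
--     pl = ''
--     pw = ''
--     var = ''
--     num_comas = 0
--     for i in range(len(cadena)):
--         if cadena[i] == ',':
--             num_comas+=1
--         else:
--             if num_comas==0:
--                 sp += cadena[i]
--             elif num_comas==1:
--                 sw += cadena[i]
--             elif num_comas==2:
--                 pl += cadena[i]
--             elif num_comas==3: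
--                 pw += cadena[i]
--             elif num_comas==4 and cadena[i]!='"':
--                 var += cadena[i]
--     return sp, sw, pl, pw, var
-- ===== SOURCE B (Python) =====
-- def get_comas(cadena):
--     parts = cadena.split(',')
--     parts += [''] * (5 - len(parts))
--     sp, sw, pl, pw, var = parts[:5]
--     var = ''.join(c for c in var if c != '"')
--     return sp, sw, pl, pw, var
-- ===== Notes on version B (the rewrite author's own statement) =====
-- stated objective: simpler
-- what changed: Replaces the character-by-character comma-counting accumulator loop with a single comma split followed by padding to 5 fields and a quote-filter on the fifth field.
import Mathlib
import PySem

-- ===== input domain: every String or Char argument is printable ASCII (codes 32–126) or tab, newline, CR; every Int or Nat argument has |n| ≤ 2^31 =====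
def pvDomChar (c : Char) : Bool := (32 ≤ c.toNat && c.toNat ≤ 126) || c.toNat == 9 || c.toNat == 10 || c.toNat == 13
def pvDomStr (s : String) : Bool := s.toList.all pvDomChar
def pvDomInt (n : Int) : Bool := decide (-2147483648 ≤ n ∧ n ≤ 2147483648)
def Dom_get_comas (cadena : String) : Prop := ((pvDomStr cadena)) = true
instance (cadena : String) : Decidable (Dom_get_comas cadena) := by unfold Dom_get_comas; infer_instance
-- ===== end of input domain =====

-- B replaces A's comma-counting accumulator loop by split(',') + pad to 5 fields + quote-filter on the fifth (simpler; return value proved equal on all inputs).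

-- ===== PORT A =====
-- A's for-loop over the characters, with the five string accumulators and num_comas as parameters.
def getComasLoop : List Char → List Char → List Char → List Char → List Char → List Char → Nat →
    List Char × List Char × List Char × List Char × List Char
  | [], sp, sw, pl, pw, var, _ => (sp, sw, pl, pw, var)
  | c :: t, sp, sw, pl, pw, var, n =>
    if c = ',' then getComasLoop t sp sw pl pw var (n + 1)
    else if n = 0 then getComasLoop t (sp ++ [c]) sw pl pw var n
    else if n = 1 then getComasLoop t sp (sw ++ [c]) pl pw var n
    else if n = 2 then getComasLoop t sp sw (pl ++ [c]) pw var n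
    else if n = 3 then getComasLoop t sp sw pl (pw ++ [c]) var n
    else if n = 4 ∧ c ≠ '"' then getComasLoop t sp sw pl pw (var ++ [c]) n
    else getComasLoop t sp sw pl pw var n

def get_comas (cadena : String) : String × String × String × String × String :=
  let (sp, sw, pl, pw, var) := getComasLoop cadena.toList [] [] [] [] [] 0
  (String.mk sp, String.mk sw, String.mk pl, String.mk pw, String.mk var)

-- ===== PORT B =====
-- Hand port of cadena.split(',') on the char list: exact Python semantics for a 1-char separator
-- (''.split(',') = [''], empty pieces kept).
def splitComma : List Char → List (List Char)
  | [] => [[]]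
  | c :: t =>
    if c = ',' then [] :: splitComma t
    else (c :: (splitComma t).headD []) :: (splitComma t).tail

def get_comas_alt (cadena : String) : String × String × String × String × String :=
  let parts0 := splitComma cadena.toList
  let parts := parts0 ++ List.replicate (5 - parts0.length) ([] : List Char)
  (String.mk (parts.getD 0 []), String.mk (parts.getD 1 []), String.mk (parts.getD 2 []),
   String.mk (parts.getD 3 []), String.mk ((parts.getD 4 []).filter (fun c => c ≠ '"')))

-- ===== PRECONDITION & SPEC =====
def Spec_get_comas (cadena : String) (out : String × String × String × String × String) : Prop := out = get_comas_alt cadena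
instance (cadena : String) (out : String × String × String × String × String) : Decidable (Spec_get_comas cadena out) := by unfold Spec_get_comas; infer_instance

-- ===== CLAIM (what is proved, stated in full; the proofs are below) =====
def Claim_equal_get_comas : Prop := ∀ (cadena : String), Dom_get_comas cadena → Spec_get_comas cadena (get_comas cadena)

-- ===== LEMMAS AND PROOFS =====

lemma splitComma_cons_ex (l : List Char) : ∃ p ps, splitComma l = p :: ps := by
  cases l with
  | nil => exact ⟨[], [], rfl⟩
  | cons c t =>
    by_cases hc : c = ','
    · exact ⟨[], splitComma t, by simp [splitComma, hc]⟩
    · exact ⟨c :: (splitComma t).headD [], (splitComma t).tail, by simp [splitComma, hc]⟩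

lemma loop_ge5 (l : List Char) : ∀ sp sw pl pw var n, 5 ≤ n →
    getComasLoop l sp sw pl pw var n = (sp, sw, pl, pw, var) := by
  induction l with
  | nil => intro _ _ _ _ _ _ _; rfl
  | cons c t ih =>
    intro sp sw pl pw var n hn
    simp only [getComasLoop]
    split_ifs with h1 h2 h3 h4 h5 h6 <;> first | omega | exact ih _ _ _ _ _ _ (by omega)

lemma loop4 (l : List Char) : ∀ sp sw pl pw var,
    getComasLoop l sp sw pl pw var 4 =
      (sp, sw, pl, pw, var ++ ((splitComma l).getD 0 []).filter (fun c => c ≠ '"')) := by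
  induction l with
  | nil => intro _ _ _ _ _; simp [getComasLoop, splitComma]
  | cons c t ih =>
    intro sp sw pl pw var
    obtain ⟨p, ps, hs⟩ := splitComma_cons_ex t
    by_cases hc : c = ','
    · simp [getComasLoop, hc, splitComma, loop_ge5]
    · by_cases hq : c = '"'
      · simp [getComasLoop, hc, hq, splitComma, hs, ih]
      · simp [getComasLoop, hc, hq, splitComma, hs, ih]

lemma loop3 (l : List Char) : ∀ sp sw pl pw var,
    getComasLoop l sp sw pl pw var 3 =
      (sp, sw, pl, pw ++ (splitComma l).getD 0 [],
       var ++ ((splitComma l).getD 1 []).filter (fun c => c ≠ '"')) := by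
  induction l with
  | nil => intro _ _ _ _ _; simp [getComasLoop, splitComma]
  | cons c t ih =>
    intro sp sw pl pw var
    obtain ⟨p, ps, hs⟩ := splitComma_cons_ex t
    by_cases hc : c = ','
    · simp [getComasLoop, hc, splitComma, loop4]
    · simp [getComasLoop, hc, splitComma, hs, ih]

lemma loop2 (l : List Char) : ∀ sp sw pl pw var,
    getComasLoop l sp sw pl pw var 2 =
      (sp, sw, pl ++ (splitComma l).getD 0 [], pw ++ (splitComma l).getD 1 [],
       var ++ ((splitComma l).getD 2 []).filter (fun c => c ≠ '"')) := by
  induction l with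
  | nil => intro _ _ _ _ _; simp [getComasLoop, splitComma]
  | cons c t ih =>
    intro sp sw pl pw var
    obtain ⟨p, ps, hs⟩ := splitComma_cons_ex t
    by_cases hc : c = ','
    · simp [getComasLoop, hc, splitComma, hs, loop3]
    · simp [getComasLoop, hc, splitComma, hs, ih]

lemma loop1 (l : List Char) : ∀ sp sw pl pw var,
    getComasLoop l sp sw pl pw var 1 =
      (sp, sw ++ (splitComma l).getD 0 [], pl ++ (splitComma l).getD 1 [],
       pw ++ (splitComma l).getD 2 [],
       var ++ ((splitComma l).getD 3 []).filter (fun c => c ≠ '"')) := by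
  induction l with
  | nil => intro _ _ _ _ _; simp [getComasLoop, splitComma]
  | cons c t ih =>
    intro sp sw pl pw var
    obtain ⟨p, ps, hs⟩ := splitComma_cons_ex t
    by_cases hc : c = ','
    · simp [getComasLoop, hc, splitComma, hs, loop2]
    · simp [getComasLoop, hc, splitComma, hs, ih]

lemma loop0 (l : List Char) : ∀ sp sw pl pw var,
    getComasLoop l sp sw pl pw var 0 =
      (sp ++ (splitComma l).getD 0 [], sw ++ (splitComma l).getD 1 [],
       pl ++ (splitComma l).getD 2 [], pw ++ (splitComma l).getD 3 [],
       var ++ ((splitComma l).getD 4 []).filter (fun c => c ≠ '"')) := by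
  induction l with
  | nil => intro _ _ _ _ _; simp [getComasLoop, splitComma]
  | cons c t ih =>
    intro sp sw pl pw var
    obtain ⟨p, ps, hs⟩ := splitComma_cons_ex t
    by_cases hc : c = ','
    · simp [getComasLoop, hc, splitComma, hs, loop1]
    · simp [getComasLoop, hc, splitComma, hs, ih]

lemma getD_pad (ps : List (List Char)) (k i : Nat) :
    (ps ++ List.replicate k ([] : List Char)).getD i [] = ps.getD i [] := by
  induction ps generalizing i with
  | nil =>
    simp only [List.nil_append, List.getD]
    cases h : (List.replicate k ([] : List Char))[i]? with
    | none => rfl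
    | some v => simp [List.getElem?_replicate] at h; simp [h.2]
  | cons p ps ih =>
    cases i with
    | zero => rfl
    | succ j => simpa using ih j

-- ===== VERDICT (by name: the statement is the Claim_ definition above) =====
theorem get_comas_spec : Claim_equal_get_comas := by
  intro cadena _
  unfold Spec_get_comas get_comas get_comas_alt
  simp only [loop0, getD_pad, List.nil_append]
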